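-- pv_equiv track=rewrite | github.com/Makoni-Milli/shein-star | comp.py | CA12
-- ===== SOURCE A (Python) =====
-- from collections import Counter
--
-- def CA12(filestring,f,b):
--     oplist=[]
--     for i in f:
--         for j in b:
--             if j > i:
--                 substr = filestring[i+1:j]
--                 chk = counter_check(substr)
--                 if chk[0] == True:
--                     oplist.append(substr)
--                     break
--     return oplist
--
-- def counter_check(string,cpf='{',cpb='}',rpf='(',rpb=')',spf='[',spb=']',dq='"',sq="'",apf='<',apb='>'):
--     C = Counter(string)
--     if C[cpf] != C[cpb]:
--         return False, 'exit code 1'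
--     if C[rpf] != C[rpb]:
--         return False, 'exit code 2'
--     if C[spf] != C[spb]:
--         return False, 'exit code 3'
--     if C[apf] != C[apb]:
--         return False, 'exit code 4'
--     if C[dq] % 2 != 0:
--         return False, 'exit code 5'
--     if C[sq] % 2 != 0:
--         return False, 'exit code 6'
--     else:
--         return True, None
-- ===== SOURCE B (Python) =====
-- def CA12(filestring, f, b):
--     # One pass builds prefix balance/quote counts; each (i, j) pair is then
--     # checked in O(1) instead of recounting the substring.
--     n = len(filestring)
--     pref = [(0, 0, 0, 0, 0, 0)]
--     c1 = c2 = c3 = c4 = q1 = q2 = 0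
--     for ch in filestring:
--         if ch == '{':
--             c1 += 1
--         elif ch == '}':
--             c1 -= 1
--         elif ch == '(':
--             c2 += 1
--         elif ch == ')':
--             c2 -= 1
--         elif ch == '[':
--             c3 += 1
--         elif ch == ']':
--             c3 -= 1
--         elif ch == '<':
--             c4 += 1
--         elif ch == '>':
--             c4 -= 1
--         elif ch == '"':
--             q1 += 1
--         elif ch == "'":
--             q2 += 1
--         pref.append((c1, c2, c3, c4, q1, q2))
--
--     out = []
--     for i in f:
--         for j in b:
--             if j > i:
--                 s, e, _ = slice(i + 1, j).indices(n)
--                 e = max(s, e)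
--                 a = pref[s]
--                 z = pref[e]
--                 if (a[0] == z[0] and a[1] == z[1] and a[2] == z[2] and a[3] == z[3]
--                         and (z[4] - a[4]) % 2 == 0 and (z[5] - a[5]) % 2 == 0):
--                     out.append(filestring[s:e])
--                     break
--     return out
-- ===== Notes on version B (the rewrite author's own statement) =====
-- stated objective: faster
-- what changed: B precomputes one prefix table of bracket balances and quote counts in a single pass over the string, resolves each pair's bounds with the stdlib slice(...).indices(n), and checks each (i,j) pair in O(1) by subtracting prefix entries instead of slicing and re-counting the substring with a Counter for every pair.
import Mathlib
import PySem

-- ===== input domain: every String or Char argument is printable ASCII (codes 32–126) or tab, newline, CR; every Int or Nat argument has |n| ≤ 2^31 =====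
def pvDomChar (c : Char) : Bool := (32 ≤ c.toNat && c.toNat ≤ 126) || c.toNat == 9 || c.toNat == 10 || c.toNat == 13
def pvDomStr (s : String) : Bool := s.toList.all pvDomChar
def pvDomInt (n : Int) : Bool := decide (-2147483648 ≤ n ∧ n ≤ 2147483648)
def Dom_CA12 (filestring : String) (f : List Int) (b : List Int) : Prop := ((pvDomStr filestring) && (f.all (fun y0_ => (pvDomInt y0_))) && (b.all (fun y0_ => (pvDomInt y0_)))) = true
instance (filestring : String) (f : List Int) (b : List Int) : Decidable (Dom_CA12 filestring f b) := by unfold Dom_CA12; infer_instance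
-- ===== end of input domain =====

-- B replaces A's per-pair substring Counter check by a single prefix-count pass with slice-bound resolution via the stdlib slice.indices idiom, checking each (i,j) pair in O(1) (objective: faster).


-- ===== PORT A =====
-- Counter lookups C[c] are ported as `string.toList.count c`.
def counterCheckA (string : String) : Bool × Option String :=
  let C := string.toList
  if C.count '{' ≠ C.count '}' then (false, some "exit code 1")
  else if C.count '(' ≠ C.count ')' then (false, some "exit code 2")
  else if C.count '[' ≠ C.count ']' then (false, some "exit code 3")
  else if C.count '<' ≠ C.count '>' then (false, some "exit code 4")
  else if C.count '"' % 2 ≠ 0 then (false, some "exit code 5")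
  else if C.count '\'' % 2 ≠ 0 then (false, some "exit code 6")
  else (true, none)

-- inner `for j in b` loop with its `break`
def innerA (fs : String) (i : Int) : List Int → List String → List String
  | [], oplist => oplist
  | j :: rest, oplist =>
    if j > i then
      let substr := PySem.Str.slice fs (some (i + 1)) (some j)
      let chk := counterCheckA substr
      if chk.1 = true then oplist ++ [substr]
      else innerA fs i rest oplist
    else innerA fs i rest oplist

def CA12 (filestring : String) (f : List Int) (b : List Int) : List String :=
  f.foldl (fun oplist i => innerA filestring i b oplist) []

-- ===== PORT B =====
-- running state (c1, c2, c3, c4, q1, q2) of Source B's prefix pass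
def stepB (t : Int × Int × Int × Int × Int × Int) (ch : Char) : Int × Int × Int × Int × Int × Int :=
  let (c1, c2, c3, c4, q1, q2) := t
  if ch = '{' then (c1 + 1, c2, c3, c4, q1, q2)
  else if ch = '}' then (c1 - 1, c2, c3, c4, q1, q2)
  else if ch = '(' then (c1, c2 + 1, c3, c4, q1, q2)
  else if ch = ')' then (c1, c2 - 1, c3, c4, q1, q2)
  else if ch = '[' then (c1, c2, c3 + 1, c4, q1, q2)
  else if ch = ']' then (c1, c2, c3 - 1, c4, q1, q2)
  else if ch = '<' then (c1, c2, c3, c4 + 1, q1, q2)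
  else if ch = '>' then (c1, c2, c3, c4 - 1, q1, q2)
  else if ch = '"' then (c1, c2, c3, c4, q1 + 1, q2)
  else if ch = '\'' then (c1, c2, c3, c4, q1, q2 + 1)
  else t

-- inner `for j in b` loop of Source B; `slice(i+1, j).indices(n)` is exactly PySem.List.clampIdx on each bound
def innerB (fs : String) (n : Nat) (pref : List (Int × Int × Int × Int × Int × Int))
    (i : Int) : List Int → List String → List String
  | [], out => out
  | j :: rest, out =>
    if j > i then
      let s := PySem.List.clampIdx n (i + 1)
      let e := max s (PySem.List.clampIdx n j)
      let (a1, a2, a3, a4, a5, a6) := pref.getD s (0, 0, 0, 0, 0, 0)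
      let (z1, z2, z3, z4, z5, z6) := pref.getD e (0, 0, 0, 0, 0, 0)
      if a1 == z1 && a2 == z2 && a3 == z3 && a4 == z4
          && (z5 - a5) % 2 == 0 && (z6 - a6) % 2 == 0 then
        out ++ [PySem.Str.slice fs (some (s : Int)) (some (e : Int))]
      else innerB fs n pref i rest out
    else innerB fs n pref i rest out

def CA12_alt (filestring : String) (f : List Int) (b : List Int) : List String :=
  let cs := filestring.toList
  let n := cs.length
  let pref := (cs.foldl
    (fun (st : List (Int × Int × Int × Int × Int × Int) × (Int × Int × Int × Int × Int × Int)) ch =>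
      let t := stepB st.2 ch; (st.1 ++ [t], t))
    ([(0, 0, 0, 0, 0, 0)], (0, 0, 0, 0, 0, 0))).1
  f.foldl (fun out i => innerB filestring n pref i b out) []

-- ===== PRECONDITION & SPEC =====
def Spec_CA12 (filestring : String) (f : List Int) (b : List Int) (out : List String) : Prop := out = CA12_alt filestring f b
instance (filestring : String) (f : List Int) (b : List Int) (out : List String) : Decidable (Spec_CA12 filestring f b out) := by unfold Spec_CA12; infer_instance

-- ===== CLAIM (what is proved, stated in full; the proofs are below) =====
def Claim_equal_CA12 : Prop := ∀ (filestring : String) (f : List Int) (b : List Int), Dom_CA12 filestring f b → Spec_CA12 filestring f b (CA12 filestring f b)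

-- ===== LEMMAS AND PROOFS =====

-- the intended value of B's running state after reading cs
def prefVal (cs : List Char) : Int × Int × Int × Int × Int × Int :=
  ((cs.count '{' : Int) - cs.count '}', (cs.count '(' : Int) - cs.count ')',
   (cs.count '[' : Int) - cs.count ']', (cs.count '<' : Int) - cs.count '>',
   (cs.count '"' : Int), (cs.count '\'' : Int))

-- the intended value of B's pref list
def prefList (cs : List Char) : List (Int × Int × Int × Int × Int × Int) :=
  (List.range (cs.length + 1)).map (fun k => prefVal (cs.take k))

theorem stepB_eq (xs : List Char) (ch : Char) :
    stepB (prefVal xs) ch = prefVal (xs ++ [ch]) := by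
  by_cases h1 : ch = '{'
  · subst h1; simp [stepB, prefVal, List.count_append] <;> omega
  by_cases h2 : ch = '}'
  · subst h2; simp [stepB, prefVal, List.count_append] <;> omega
  by_cases h3 : ch = '('
  · subst h3; simp [stepB, prefVal, List.count_append] <;> omega
  by_cases h4 : ch = ')'
  · subst h4; simp [stepB, prefVal, List.count_append] <;> omega
  by_cases h5 : ch = '['
  · subst h5; simp [stepB, prefVal, List.count_append] <;> omega
  by_cases h6 : ch = ']'
  · subst h6; simp [stepB, prefVal, List.count_append] <;> omega
  by_cases h7 : ch = '<'
  · subst h7; simp [stepB, prefVal, List.count_append] <;> omega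
  by_cases h8 : ch = '>'
  · subst h8; simp [stepB, prefVal, List.count_append] <;> omega
  by_cases h9 : ch = '"'
  · subst h9; simp [stepB, prefVal, List.count_append]
  by_cases h10 : ch = '\''
  · subst h10; simp [stepB, prefVal, List.count_append]
  simp [stepB, prefVal, List.count_append, h1, h2, h3, h4, h5, h6, h7, h8, h9, h10]

theorem prefList_snoc (xs : List Char) (ch : Char) :
    prefList xs ++ [prefVal (xs ++ [ch])] = prefList (xs ++ [ch]) := by
  simp only [prefList, List.length_append, List.length_singleton]
  conv_rhs => rw [List.range_succ, List.map_append]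
  congr 1
  · apply List.map_congr_left
    intro k hk
    have hkle : k ≤ xs.length := by
      have := List.mem_range.mp hk; omega
    rw [List.take_append_of_le_length hkle]
  · simp only [List.map_cons, List.map_nil]
    rw [List.take_of_length_le (by simp)]

theorem foldl_pref (cs : List Char) : ∀ done : List Char,
    cs.foldl
      (fun (st : List (Int × Int × Int × Int × Int × Int) × (Int × Int × Int × Int × Int × Int)) ch =>
        let t := stepB st.2 ch; (st.1 ++ [t], t))
      (prefList done, prefVal done)
    = (prefList (done ++ cs), prefVal (done ++ cs)) := by
  induction cs with
  | nil => intro done; simp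
  | cons c cs ih =>
    intro done
    simp only [List.foldl_cons]
    rw [stepB_eq, prefList_snoc, ih (done ++ [c])]
    simp

theorem prefList_getD (cs : List Char) (k : Nat) (hk : k ≤ cs.length) :
    (prefList cs).getD k (0, 0, 0, 0, 0, 0) = prefVal (cs.take k) := by
  rw [List.getD_eq_getElem?_getD]
  simp only [prefList]
  rw [List.getElem?_map, List.getElem?_range (by omega)]
  rfl

theorem counterCheckA_fst (s : String) :
    (counterCheckA s).1 = (s.toList.count '{' == s.toList.count '}'
      && (s.toList.count '(' == s.toList.count ')')
      && (s.toList.count '[' == s.toList.count ']')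
      && (s.toList.count '<' == s.toList.count '>')
      && (s.toList.count '"' % 2 == 0)
      && (s.toList.count '\'' % 2 == 0)) := by
  simp only [counterCheckA]
  split_ifs <;> simp_all

-- the per-pair agreement: A's counter check on the slice equals B's prefix lookup
theorem inner_eq (fs : String) (i : Int) (bl : List Int) : ∀ out : List String,
    innerA fs i bl out = innerB fs fs.toList.length (prefList fs.toList) i bl out := by
  induction bl with
  | nil => intro out; rfl
  | cons j rest ih =>
    intro out
    simp only [innerA, innerB]
    by_cases hji : j > i
    · simp only [if_pos hji]
      set cs := fs.toList with hcs
      set n := cs.length with hn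
      set s := PySem.List.clampIdx n (i + 1) with hs
      set e0 := PySem.List.clampIdx n j with he0
      set e := max s e0 with he
      have hsn : s ≤ n := by rw [hs]; exact PySem.List.clampIdx_le n _
      have he0n : e0 ≤ n := by rw [he0]; exact PySem.List.clampIdx_le n _
      have hse : s ≤ e := by rw [he]; omega
      have hen : e ≤ n := by rw [he]; omega
      -- the substring both sides slice out
      have hslice : PySem.Chars.slice cs (some (i + 1)) (some j)
          = (cs.drop s).take (e - s) := by
        simp only [PySem.Chars.slice, PySem.List.slice, ← hs, ← he0, ← hn]
        congr 1
        rw [he]; omega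
      have hslice2 : PySem.Chars.slice cs (some (s : Int)) (some (e : Int))
          = (cs.drop s).take (e - s) := by
        simp only [PySem.Chars.slice, PySem.List.slice, ← hn,
          PySem.List.clampIdx_natCast, Nat.min_eq_left hsn, Nat.min_eq_left hen]
      have hsubstr : PySem.Str.slice fs (some (i + 1)) (some j)
          = PySem.Str.slice fs (some (s : Int)) (some (e : Int)) := by
        simp only [PySem.Str.slice, ← hcs, hslice, hslice2]
      set seg := (cs.drop s).take (e - s) with hseg
      -- prefix decomposition: cs.take e = cs.take s ++ seg
      have hdec : cs.take e = cs.take s ++ seg := by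
        rw [hseg]
        conv_lhs => rw [show e = s + (e - s) by omega]
        exact List.take_add
      -- the checks agree
      have hchk : (counterCheckA (PySem.Str.slice fs (some (i + 1)) (some j))).1
          = (((prefList cs).getD s (0,0,0,0,0,0)).1 == ((prefList cs).getD e (0,0,0,0,0,0)).1
            && (((prefList cs).getD s (0,0,0,0,0,0)).2.1 == ((prefList cs).getD e (0,0,0,0,0,0)).2.1)
            && (((prefList cs).getD s (0,0,0,0,0,0)).2.2.1 == ((prefList cs).getD e (0,0,0,0,0,0)).2.2.1)
            && (((prefList cs).getD s (0,0,0,0,0,0)).2.2.2.1 == ((prefList cs).getD e (0,0,0,0,0,0)).2.2.2.1)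
            && ((((prefList cs).getD e (0,0,0,0,0,0)).2.2.2.2.1 - ((prefList cs).getD s (0,0,0,0,0,0)).2.2.2.2.1) % 2 == 0)
            && ((((prefList cs).getD e (0,0,0,0,0,0)).2.2.2.2.2 - ((prefList cs).getD s (0,0,0,0,0,0)).2.2.2.2.2) % 2 == 0)) := by
        rw [counterCheckA_fst, prefList_getD cs s hsn, prefList_getD cs e hen]
        have htl : (PySem.Str.slice fs (some (i + 1)) (some j)).toList = seg := by
          simp only [PySem.Str.slice, String.toList_ofList, ← hcs, hslice, hseg]
        rw [htl]
        simp only [prefVal, hdec, List.count_append]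
        rw [Bool.eq_iff_iff]
        simp only [Bool.and_eq_true, beq_iff_eq]
        omega
      -- finish the branch
      rw [hchk, hsubstr]
      split
      · rfl
      · exact ih out
    · simp only [if_neg hji]; exact ih out

-- ===== VERDICT (by name: the statement is the Claim_ definition above) =====
theorem CA12_spec : Claim_equal_CA12 := by
  intro fs f b _
  unfold Spec_CA12 CA12 CA12_alt
  have hpref : (fs.toList.foldl
      (fun (st : List (Int × Int × Int × Int × Int × Int) × (Int × Int × Int × Int × Int × Int)) ch =>
        let t := stepB st.2 ch; (st.1 ++ [t], t))
      ([(0, 0, 0, 0, 0, 0)], (0, 0, 0, 0, 0, 0))).1 = prefList fs.toList := by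
    have h0 : prefList ([] : List Char) = [(0, 0, 0, 0, 0, 0)] := rfl
    have h1 : prefVal ([] : List Char) = (0, 0, 0, 0, 0, 0) := rfl
    rw [← h0, ← h1, foldl_pref fs.toList []]
    simp
  simp only [hpref]
  have hfun : (fun (oplist : List String) (i : Int) => innerA fs i b oplist)
      = (fun out i => innerB fs fs.toList.length (prefList fs.toList) i b out) := by
    funext op i; exact inner_eq fs i b op
  rw [hfun]
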